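-- pv_equiv track=rewrite | github.com/EbolaEmperor/Toppen | toppen.py | check_unfavorable_3_stack_pattern
-- ===== SOURCE A (Python) =====
-- from typing import List, Tuple, Optional
--
-- Player = int                    # 1 或 2
--
-- StackBoard = List[List[List[Player]]]
--
-- BOARD_ROWS = 4
--
-- BOARD_COLS = 4
--
-- def get_nonempty_cells(board: StackBoard) -> List[Tuple[int, int]]:
--     cells = []
--     for r in range(BOARD_ROWS):
--         for c in range(BOARD_COLS):
--             if board[r][c]:
--                 cells.append((r, c))
--     return cells
--
-- def check_unfavorable_3_stack_pattern(board: StackBoard, ai_player: Player) -> bool: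
--     """
--     Check if the board has an unfavorable pattern for AI:
--     - Exactly 3 stacks remain
--     - One stack is in the "middle" position (adjacent to both other stacks)
--     - The other two stacks are NOT adjacent to each other
--     - The middle stack has AI's piece at the bottom
--     - The two side stacks have opponent's pieces at the bottom
--
--     This pattern is unfavorable because AI is trapped in the middle while
--     the opponent controls both sides.
--     """
--     cells = get_nonempty_cells(board)
--     if len(cells) != 3:
--         return False
--
--     # Get bottom pieces for each stack (only consider bottom, not top)
--     stacks_info = []
--     for r, c in cells:
--         stack = board[r][c]
--         if not stack:
--             return False
--         bottom = stack[0]  # Only check bottom piece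
--         stacks_info.append((r, c, bottom))
--
--     opponent = 3 - ai_player
--
--     # Find which stack is in the middle (adjacent to both other stacks)
--     for i in range(3):
--         middle_stack = stacks_info[i]
--         other_stacks = [stacks_info[j] for j in range(3) if j != i]
--
--         middle_pos = (middle_stack[0], middle_stack[1])
--         other1_pos = (other_stacks[0][0], other_stacks[0][1])
--         other2_pos = (other_stacks[1][0], other_stacks[1][1])
--
--         # Check if middle stack is adjacent to both other stacks
--         dist_to_other1 = abs(middle_pos[0] - other1_pos[0]) + abs(middle_pos[1] - other1_pos[1])
--         dist_to_other2 = abs(middle_pos[0] - other2_pos[0]) + abs(middle_pos[1] - other2_pos[1])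
--
--         # Middle stack must be adjacent (distance 1) to both other stacks
--         if dist_to_other1 != 1 or dist_to_other2 != 1:
--             continue
--
--         # Check if the other two stacks are NOT adjacent to each other
--         dist_other1_other2 = abs(other1_pos[0] - other2_pos[0]) + abs(other1_pos[1] - other2_pos[1])
--         if dist_other1_other2 == 1:
--             # They are adjacent, so this is not the pattern we're looking for
--             continue
--
--         # Now check bottom pieces:
--         # Middle stack should have AI's bottom piece
--         # Both side stacks should have opponent's bottom pieces
--         if (middle_stack[2] == ai_player and
--             other_stacks[0][2] == opponent and
--             other_stacks[1][2] == opponent):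
--             return True
--
--     return False
-- ===== SOURCE B (Python) =====
-- def check_unfavorable_3_stack_pattern(board, ai_player):
--     # Classify adjacency edges of the 3-stack triangle once, instead of trying each stack as middle.
--     cells = [(r, c) for r in range(4) for c in range(4) if board[r][c]]
--     if len(cells) != 3:
--         return False
--     bottoms = [board[r][c][0] for r, c in cells]
--
--     def dist(p, q):
--         return abs(p[0] - q[0]) + abs(p[1] - q[1])
--
--     edges = [(i, j) for i in range(3) for j in range(i + 1, 3)
--              if dist(cells[i], cells[j]) == 1]
--     if len(edges) != 2:
--         return False
--     (a1, b1), (a2, b2) = edges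
--     mid = a2 if a2 in (a1, b1) else b2
--     opponent = 3 - ai_player
--     return bottoms[mid] == ai_player and all(
--         bottoms[k] == opponent for k in range(3) if k != mid)
-- ===== Notes on version B (the rewrite author's own statement) =====
-- stated objective: simpler
-- what changed: Replaces A's try-each-stack-as-middle loop (recomputing pairwise distances per candidate with early continue) by computing the three pairwise adjacency edges once and requiring exactly two edges, whose shared vertex is the middle stack.
import Mathlib
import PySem

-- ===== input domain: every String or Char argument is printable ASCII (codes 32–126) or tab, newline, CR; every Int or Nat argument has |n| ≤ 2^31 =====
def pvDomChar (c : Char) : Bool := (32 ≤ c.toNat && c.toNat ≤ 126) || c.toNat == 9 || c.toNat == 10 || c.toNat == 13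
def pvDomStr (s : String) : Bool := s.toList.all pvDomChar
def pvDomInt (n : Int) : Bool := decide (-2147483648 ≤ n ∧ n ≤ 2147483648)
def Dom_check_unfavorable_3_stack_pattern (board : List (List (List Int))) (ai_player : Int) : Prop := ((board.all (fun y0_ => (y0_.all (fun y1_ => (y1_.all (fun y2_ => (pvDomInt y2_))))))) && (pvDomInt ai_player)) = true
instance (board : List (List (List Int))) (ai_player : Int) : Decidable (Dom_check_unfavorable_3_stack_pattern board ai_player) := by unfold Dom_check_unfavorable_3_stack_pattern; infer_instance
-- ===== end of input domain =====

-- B replaces A's try-each-stack-as-middle loop by classifying the adjacency edges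
-- of the 3-stack triangle once; objective: simpler.

-- board[r][c] (total accessor; Pre_ keeps the indices in range)
def pvCell (board : List (List (List Int))) (r c : Int) : List Int :=
  (PySem.List.pyGet? ((PySem.List.pyGet? board r).getD []) c).getD []

-- ===== PORT A =====
def get_nonempty_cells (board : List (List (List Int))) : List (Int × Int) :=
  (PySem.List.pyRange 0 4 1).foldl (fun acc r =>
    (PySem.List.pyRange 0 4 1).foldl (fun acc c =>
      if pvCell board r c ≠ [] then acc ++ [(r, c)] else acc) acc) []

-- the stacks_info loop, with the early 'return False' as none
def pvStacksInfo (board : List (List (List Int))) : List (Int × Int) → Option (List (Int × Int × Int))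
  | [] => some []
  | (r, c) :: rest =>
    match pvCell board r c with
    | [] => none
    | bottom :: _ => (pvStacksInfo board rest).map (fun t => (r, c, bottom) :: t)

def pvIdx3 (si : List (Int × Int × Int)) (i : Int) : Int × Int × Int :=
  (PySem.List.pyGet? si i).getD (0, 0, 0)

def pvDistA (p q : Int × Int × Int) : Int := |p.1 - q.1| + |p.2.1 - q.2.1|

-- one iteration of A's 'for i in range(3)' loop body
def pvTryMiddle (si : List (Int × Int × Int)) (ai_player : Int) (i : Int) : Bool :=
  let middle := pvIdx3 si i
  let others := ((PySem.List.pyRange 0 3 1).filter (fun j => j ≠ i)).map (pvIdx3 si)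
  let o1 := (PySem.List.pyGet? others 0).getD (0, 0, 0)
  let o2 := (PySem.List.pyGet? others 1).getD (0, 0, 0)
  if pvDistA middle o1 ≠ 1 ∨ pvDistA middle o2 ≠ 1 then false
  else if pvDistA o1 o2 = 1 then false
  else decide (middle.2.2 = ai_player ∧ o1.2.2 = 3 - ai_player ∧ o2.2.2 = 3 - ai_player)

def check_unfavorable_3_stack_pattern (board : List (List (List Int))) (ai_player : Int) : Bool :=
  let cells := get_nonempty_cells board
  if cells.length ≠ 3 then false
  else
    match pvStacksInfo board cells with
    | none => false
    | some si => (PySem.List.pyRange 0 3 1).any (fun i => pvTryMiddle si ai_player i)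

-- ===== PORT B =====
def pvDistB (p q : Int × Int) : Int := |p.1 - q.1| + |p.2 - q.2|

def check_unfavorable_3_stack_pattern_alt (board : List (List (List Int))) (ai_player : Int) : Bool :=
  let cells := (PySem.List.pyRange 0 4 1).flatMap (fun r =>
    ((PySem.List.pyRange 0 4 1).filter (fun c => pvCell board r c ≠ [])).map (fun c => (r, c)))
  if cells.length ≠ 3 then false
  else
    let bottoms := cells.map (fun p => (pvCell board p.1 p.2).headD 0)
    let cellAt := fun (i : Int) => (PySem.List.pyGet? cells i).getD (0, 0)
    let edges := (PySem.List.pyRange 0 3 1).flatMap (fun i =>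
      ((PySem.List.pyRange (i + 1) 3 1).filter (fun j => pvDistB (cellAt i) (cellAt j) = 1)).map
        (fun j => (i, j)))
    if edges.length ≠ 2 then false
    else
      match edges with
      | [(a1, b1), (a2, b2)] =>
        let mid := if a2 = a1 ∨ a2 = b1 then a2 else b2
        let opponent := 3 - ai_player
        let bAt := fun (i : Int) => (PySem.List.pyGet? bottoms i).getD 0
        decide (bAt mid = ai_player) &&
          ((PySem.List.pyRange 0 3 1).filter (fun k => k ≠ mid)).all (fun k => decide (bAt k = opponent))
      | _ => false

-- ===== PRECONDITION & SPEC =====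
-- A raises IndexError unless the board has at least 4 rows whose first 4 rows each have at least 4 columns.
def Pre_check_unfavorable_3_stack_pattern (board : List (List (List Int))) (ai_player : Int) : Prop :=
  4 ≤ board.length ∧ ∀ row ∈ board.take 4, 4 ≤ row.length
instance (board : List (List (List Int))) (ai_player : Int) : Decidable (Pre_check_unfavorable_3_stack_pattern board ai_player) := by unfold Pre_check_unfavorable_3_stack_pattern; infer_instance

def pvWitness_check_unfavorable_3_stack_pattern : List (List (List Int)) × Int :=
  ([[[1], [], [], []], [[2], [2], [], []], [[], [], [], []], [[], [], [], []]], 1)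

def Spec_check_unfavorable_3_stack_pattern (board : List (List (List Int))) (ai_player : Int) (out : Bool) : Prop := out = check_unfavorable_3_stack_pattern_alt board ai_player
instance (board : List (List (List Int))) (ai_player : Int) (out : Bool) : Decidable (Spec_check_unfavorable_3_stack_pattern board ai_player out) := by unfold Spec_check_unfavorable_3_stack_pattern; infer_instance

-- ===== CLAIM (what is proved, stated in full; the proofs are below) =====
def Claim_equal_check_unfavorable_3_stack_pattern : Prop := ∀ (board : List (List (List Int))) (ai_player : Int), Dom_check_unfavorable_3_stack_pattern board ai_player → Pre_check_unfavorable_3_stack_pattern board ai_player → Spec_check_unfavorable_3_stack_pattern board ai_player (check_unfavorable_3_stack_pattern board ai_player)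

-- ===== LEMMAS AND PROOFS =====

theorem cells_eq (board : List (List (List Int))) :
    get_nonempty_cells board
      = (PySem.List.pyRange 0 4 1).flatMap (fun r =>
          ((PySem.List.pyRange 0 4 1).filter (fun c => pvCell board r c ≠ [])).map
            (fun c => (r, c))) := by
  unfold get_nonempty_cells
  simp only [PySem.List.foldl_append_ite, PySem.List.foldl_append_eq_flatMap, List.nil_append]

theorem mem_cells (board : List (List (List Int))) (x : Int × Int)
    (h : x ∈ get_nonempty_cells board) : pvCell board x.1 x.2 ≠ [] := by
  rw [cells_eq] at h
  simp only [List.mem_flatMap, List.mem_map, List.mem_filter] at h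
  obtain ⟨r, _, c, ⟨_, hne⟩, rfl⟩ := h
  simpa using hne

theorem pvMain (board : List (List (List Int))) (ai_player : Int) :
    check_unfavorable_3_stack_pattern board ai_player
      = check_unfavorable_3_stack_pattern_alt board ai_player := by
  unfold check_unfavorable_3_stack_pattern check_unfavorable_3_stack_pattern_alt
  rw [← cells_eq board]
  by_cases h3 : (get_nonempty_cells board).length = 3
  · obtain ⟨p0, p1, p2, hL⟩ := List.length_eq_three.mp h3
    have h0 := mem_cells board p0 (by rw [hL]; simp)
    have h1 := mem_cells board p1 (by rw [hL]; simp)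
    have h2 := mem_cells board p2 (by rw [hL]; simp)
    obtain ⟨b0, t0, hb0⟩ := List.exists_cons_of_ne_nil h0
    obtain ⟨b1, t1, hb1⟩ := List.exists_cons_of_ne_nil h1
    obtain ⟨b2, t2, hb2⟩ := List.exists_cons_of_ne_nil h2
    obtain ⟨r0, c0⟩ := p0
    obtain ⟨r1, c1⟩ := p1
    obtain ⟨r2, c2⟩ := p2
    rw [hL]
    have hra : PySem.List.pyRange 0 3 1 = [0, 1, 2] := by decide
    have hr1 : PySem.List.pyRange (0 + 1) 3 1 = [1, 2] := by decide
    have hr2 : PySem.List.pyRange (1 + 1) 3 1 = [2] := by decide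
    have hr3 : PySem.List.pyRange (2 + 1) 3 1 = [] := by decide
    simp only [pvStacksInfo, hb0, hb1, hb2, hra, List.flatMap_cons, List.flatMap_nil,
      List.filter_cons, List.filter_nil, hr1, hr2, hr3, List.map_cons, List.map_nil]
    have s01 : |r1 - r0| + |c1 - c0| = |r0 - r1| + |c0 - c1| := by
      rw [abs_sub_comm r1, abs_sub_comm c1]
    have s02 : |r2 - r0| + |c2 - c0| = |r0 - r2| + |c0 - c2| := by
      rw [abs_sub_comm r2, abs_sub_comm c2]
    have s12 : |r2 - r1| + |c2 - c1| = |r1 - r2| + |c1 - c2| := by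
      rw [abs_sub_comm r2, abs_sub_comm c2]
    by_cases h01 : |r0 - r1| + |c0 - c1| = 1 <;>
      by_cases h02 : |r0 - r2| + |c0 - c2| = 1 <;>
        by_cases h12 : |r1 - r2| + |c1 - c2| = 1 <;>
          simp [pvTryMiddle, pvIdx3, pvDistA, pvDistB, PySem.List.pyGet?, PySem.List.pyIdx?,
            hra, s01, s02, s12, h01, h02, h12]
  · simp [h3]

-- ===== VERDICT (by name: the statement is the Claim_ definition above) =====
theorem check_unfavorable_3_stack_pattern_spec : Claim_equal_check_unfavorable_3_stack_pattern := by
  intro board ai _ _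
  exact pvMain board ai
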